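-- pv_equiv track=rewrite | github.com/scaledown-team/HASTE | Haste/exporter.py | _byte_to_line
-- ===== SOURCE A (Python) =====
-- from typing import List, Tuple
--
-- def _byte_to_line(prefix: List[int], byte_pos: int) -> int:
--     # binary search for the rightmost line_start <= byte_pos
--     lo, hi = 0, len(prefix) - 1
--     while lo < hi:
--         mid = (lo + hi + 1) // 2
--         if prefix[mid] <= byte_pos:
--             lo = mid
--         else:
--             hi = mid - 1
--     return max(1, lo + 1)  # 1-based lines
-- ===== SOURCE B (Python) =====
-- def _byte_to_line(prefix, byte_pos):
--     count = 0
--     for p in prefix: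
--         if p <= byte_pos:
--             count += 1
--     return max(1, count)
-- ===== Notes on version B (the rewrite author's own statement) =====
-- stated objective: simpler
-- what changed: The binary search over indices is replaced by one linear pass that counts the line starts <= byte_pos and clamps the count to at least 1; Pre_ keeps the inputs where 'p <= byte_pos' is downward-closed along the list (the sorted-array assumption of a binary search), on other lists A's probe-dependent result is accidental.
-- outside the precondition, e.g. on _byte_to_line([5, 0, 0], 3): A returns 3, B returns 2
import Mathlib
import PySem

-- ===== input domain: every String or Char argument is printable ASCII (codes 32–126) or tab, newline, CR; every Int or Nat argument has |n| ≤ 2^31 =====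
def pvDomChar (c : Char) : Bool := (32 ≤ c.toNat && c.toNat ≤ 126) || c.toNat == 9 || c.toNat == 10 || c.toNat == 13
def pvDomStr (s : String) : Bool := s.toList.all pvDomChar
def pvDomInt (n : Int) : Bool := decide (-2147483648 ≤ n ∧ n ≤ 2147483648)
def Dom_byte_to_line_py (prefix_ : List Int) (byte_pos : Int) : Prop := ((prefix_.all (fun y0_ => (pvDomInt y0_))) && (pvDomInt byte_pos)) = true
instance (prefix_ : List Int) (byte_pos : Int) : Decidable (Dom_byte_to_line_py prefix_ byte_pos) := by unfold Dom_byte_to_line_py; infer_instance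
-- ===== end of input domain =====

-- B replaces A's binary search with a single counting pass; equal on nondecreasing prefix lists (Pre_).


-- ===== PORT A =====
-- the while-loop of A: lo, hi evolve by binary-search steps; terminates on (hi - lo).toNat
def btlLoop (prefix_ : List Int) (byte_pos : Int) (lo hi : Int) : Int :=
  if h : lo < hi then
    let mid := PySem.Int.floordiv (lo + hi + 1) 2
    if PySem.List.pyGetD prefix_ mid 0 ≤ byte_pos then
      btlLoop prefix_ byte_pos mid hi
    else
      btlLoop prefix_ byte_pos lo (mid - 1)
  else lo
termination_by (hi - lo).toNat
decreasing_by
  · have h1 := PySem.Int.floordiv_mul_add_mod (lo + hi + 1) 2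
    have h2 := PySem.Int.mod_nonneg (lo + hi + 1) (b := 2) (by omega)
    have h3 := PySem.Int.mod_lt (lo + hi + 1) (b := 2) (by omega)
    omega
  · have h1 := PySem.Int.floordiv_mul_add_mod (lo + hi + 1) 2
    have h2 := PySem.Int.mod_nonneg (lo + hi + 1) (b := 2) (by omega)
    have h3 := PySem.Int.mod_lt (lo + hi + 1) (b := 2) (by omega)
    omega

def byte_to_line_py (prefix_ : List Int) (byte_pos : Int) : Int :=
  max 1 (btlLoop prefix_ byte_pos 0 ((prefix_.length : Int) - 1) + 1)

-- ===== PORT B =====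
def byte_to_line_py_alt (prefix_ : List Int) (byte_pos : Int) : Int :=
  max 1 (prefix_.foldl (fun count p => if p ≤ byte_pos then count + 1 else count) 0)

-- ===== PRECONDITION & SPEC =====
-- Pre_ keeps exactly the inputs on which the predicate 'p ≤ byte_pos' is downward-closed along
-- the list (true on a prefix, false after) — what A's binary search assumes of its sorted array
-- of line-start offsets; on other lists A's probe-dependent value is an accident of its search path.
def Pre_byte_to_line_py (prefix_ : List Int) (byte_pos : Int) : Prop :=
  prefix_.Pairwise (fun x y => y ≤ byte_pos → x ≤ byte_pos)
instance (prefix_ : List Int) (byte_pos : Int) : Decidable (Pre_byte_to_line_py prefix_ byte_pos) := by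
  unfold Pre_byte_to_line_py; infer_instance
def pvWitness_byte_to_line_py : List Int × Int := ([0, 10, 25, 25, 40], 26)

def Spec_byte_to_line_py (prefix_ : List Int) (byte_pos : Int) (out : Int) : Prop := out = byte_to_line_py_alt prefix_ byte_pos
instance (prefix_ : List Int) (byte_pos : Int) (out : Int) : Decidable (Spec_byte_to_line_py prefix_ byte_pos out) := by unfold Spec_byte_to_line_py; infer_instance

-- ===== CLAIM (what is proved, stated in full; the proofs are below) =====
def Claim_equal_byte_to_line_py : Prop := ∀ (prefix_ : List Int) (byte_pos : Int), Dom_byte_to_line_py prefix_ byte_pos → Pre_byte_to_line_py prefix_ byte_pos → Spec_byte_to_line_py prefix_ byte_pos (byte_to_line_py prefix_ byte_pos)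

-- ===== LEMMAS AND PROOFS =====

-- B's fold counts the elements ≤ byte_pos
lemma foldl_count_eq (b : Int) : ∀ (l : List Int) (acc : Int),
    l.foldl (fun count p => if p ≤ b then count + 1 else count) acc
      = acc + (l.countP (fun p => decide (p ≤ b)) : Int) := by
  intro l
  induction l with
  | nil => simp
  | cons a t ih =>
    intro acc
    simp only [List.foldl_cons, List.countP_cons, ih]
    by_cases h : a ≤ b
    · simp [h]
      omega
    · simp [h]

-- when 'p ≤ b' is downward-closed along the list, the elements ≤ b are exactly the first (countP) ones
lemma sorted_le_iff (b : Int) : ∀ (l : List Int), l.Pairwise (fun x y => y ≤ b → x ≤ b) →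
    ∀ (i : Nat) (h : i < l.length), (l[i] ≤ b ↔ i < l.countP (fun p => decide (p ≤ b))) := by
  intro l
  induction l with
  | nil => intro _ i h; simp at h
  | cons a t ih =>
    intro hp i h
    rw [List.pairwise_cons] at hp
    obtain ⟨ha, hpt⟩ := hp
    have hcz : ¬ a ≤ b → t.countP (fun p => decide (p ≤ b)) = 0 := by
      intro hab
      rw [List.countP_eq_zero]
      intro x hx
      simp only [decide_eq_true_eq]
      exact fun hxb => hab (ha x hx hxb)
    match i with
    | 0 =>
      simp only [List.getElem_cons_zero, List.countP_cons]
      by_cases hab : a ≤ b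
      · simp [hab]
      · simp [hab, hcz hab]
    | Nat.succ j =>
      simp only [List.getElem_cons_succ, List.countP_cons]
      have hj : j < t.length := by simpa using h
      have := ih hpt j hj
      by_cases hab : a ≤ b
      · simp [hab]; omega
      · have hgt : ¬ t[j] ≤ b := fun hxb => hab (ha t[j] (List.getElem_mem hj) hxb)
        simp [hab, hcz hab, hgt]

-- A's loop converges to max c 1 - 1, where c is the count of elements ≤ byte_pos
lemma btlLoop_eq (prefix_ : List Int) (b : Int) (hs : prefix_.Pairwise (fun x y => y ≤ b → x ≤ b)) :
    ∀ (k : Nat) (lo hi : Int), (hi - lo).toNat = k →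
      0 ≤ lo → lo ≤ max ((prefix_.countP (fun p => decide (p ≤ b)) : Int)) 1 - 1 →
      max ((prefix_.countP (fun p => decide (p ≤ b)) : Int)) 1 - 1 ≤ hi →
      hi ≤ (prefix_.length : Int) - 1 →
      btlLoop prefix_ b lo hi = max ((prefix_.countP (fun p => decide (p ≤ b)) : Int)) 1 - 1 := by
  intro k
  induction k using Nat.strong_induction_on with
  | _ k IH =>
    intro lo hi hk hlo hloT hThi hhi
    set c : Nat := prefix_.countP (fun p => decide (p ≤ b)) with hc
    rw [btlLoop]
    by_cases h : lo < hi
    · simp only [h, dif_pos]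
      have h1 := PySem.Int.floordiv_mul_add_mod (lo + hi + 1) 2
      have h2 := PySem.Int.mod_nonneg (lo + hi + 1) (b := 2) (by omega)
      have h3 := PySem.Int.mod_lt (lo + hi + 1) (b := 2) (by omega)
      set mid := PySem.Int.floordiv (lo + hi + 1) 2 with hmid
      have hmlo : lo < mid := by omega
      have hmhi : mid ≤ hi := by omega
      have hmn : mid.toNat < prefix_.length := by omega
      have hget : PySem.List.pyGetD prefix_ mid 0 = prefix_[mid.toNat] :=
        PySem.List.pyGetD_eq_getElem _ _ (by omega) (by omega)
      have hiff := sorted_le_iff b prefix_ hs mid.toNat hmn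
      by_cases hcond : PySem.List.pyGetD prefix_ mid 0 ≤ b
      · simp only [hcond, if_pos]
        apply IH (hi - mid).toNat (by omega) mid hi (by rfl) (by omega) ?_ hThi hhi
        -- mid ≤ max c 1 - 1 : from prefix_[mid] ≤ b we get mid < c; and mid ≥ 1
        rw [hget] at hcond
        have : (mid.toNat : Int) < (c : Int) := by exact_mod_cast hiff.mp hcond
        omega
      · simp only [hcond, if_neg, not_false_iff]
        apply IH (mid - 1 - lo).toNat (by omega) lo (mid - 1) (by rfl) hlo hloT ?_ (by omega)
        -- max c 1 - 1 ≤ mid - 1 : from ¬ prefix_[mid] ≤ b we get c ≤ mid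
        rw [hget] at hcond
        have : ¬ ((mid.toNat : Int) < (c : Int)) := by
          intro hlt
          exact hcond (hiff.mpr (by exact_mod_cast hlt))
        omega
    · simp only [h, dif_neg, not_false_iff]
      omega

-- ===== VERDICT (by name: the statement is the Claim_ definition above) =====
theorem byte_to_line_py_spec : Claim_equal_byte_to_line_py := by
  intro prefix_ b _ hpre
  unfold Spec_byte_to_line_py byte_to_line_py byte_to_line_py_alt
  rw [foldl_count_eq]
  have hcle : prefix_.countP (fun p => decide (p ≤ b)) ≤ prefix_.length :=
    List.countP_le_length
  by_cases hn : prefix_ = []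
  · subst hn
    rw [btlLoop]
    norm_num
  · have hlen : 1 ≤ prefix_.length := by
      cases prefix_ with
      | nil => exact absurd rfl hn
      | cons a t => simp
    rw [btlLoop_eq prefix_ b hpre ((((prefix_.length : Int) - 1) - 0).toNat) 0
      ((prefix_.length : Int) - 1) rfl (by omega) (by omega) (by omega) (by omega)]
    omega
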